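-- pv_equiv track=rewrite | github.com/tech-balaji-chennai/pythonic_problems | 4) Array Problems/1) 1D/04) Move All Zeros To Start Of Array/Move All Zeros To Start Of Array - Python Program.py | move_zeros_to_start_1
-- ===== SOURCE A (Python) =====
-- def move_zeros_to_start_1(arr, n):
--     if ((n == 0) or (n == 1)):
--         return arr
--
--     #temp = [None] * n
--     temp = list()
--     for i in range(n):
--         temp.append(None)
--
--     count_zero = 0
--     count_non_zero = 0
--
--     for i in range(n):
--         if (arr[i] != 0):
--             temp[count_non_zero] = arr[i]
--             count_non_zero = count_non_zero + 1
--         else: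
--             count_zero = count_zero + 1
--
--     for i in range(count_zero):
--         arr[i] = 0
--
--     j = 0
--     for i in range(count_zero, n):
--         arr[i] = temp[j]
--         j = j+1
--
--     return arr
-- ===== SOURCE B (Python) =====
-- def move_zeros_to_start_1(arr, n):
--     if n == 0 or n == 1:
--         return arr
--     write = n - 1
--     for i in range(n - 1, -1, -1):
--         if arr[i] != 0:
--             arr[write] = arr[i]
--             write = write - 1
--     for i in range(write + 1):
--         arr[i] = 0
--     return arr
-- ===== Notes on version B (the rewrite author's own statement) =====
-- stated objective: alternative
-- what changed: Replaced A's temp-array three-pass scheme (build an n-slot temp of nonzeros, then fill zeros, then copy temp back) by a single in-place backward two-pointer pass that compacts nonzeros to the right and then zero-fills the remaining prefix, using O(1) extra space instead of O(n).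
import Mathlib
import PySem

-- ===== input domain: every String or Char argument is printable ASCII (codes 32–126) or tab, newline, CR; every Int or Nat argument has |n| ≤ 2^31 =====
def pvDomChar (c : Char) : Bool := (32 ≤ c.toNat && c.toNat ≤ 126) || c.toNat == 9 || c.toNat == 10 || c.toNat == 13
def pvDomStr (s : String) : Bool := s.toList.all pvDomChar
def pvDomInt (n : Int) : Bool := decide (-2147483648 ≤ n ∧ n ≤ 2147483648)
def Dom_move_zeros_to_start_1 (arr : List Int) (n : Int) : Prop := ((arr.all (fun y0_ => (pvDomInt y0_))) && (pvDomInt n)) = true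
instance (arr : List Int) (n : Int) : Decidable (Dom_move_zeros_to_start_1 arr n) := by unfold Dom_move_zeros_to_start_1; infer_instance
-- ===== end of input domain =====

-- B replaces A's temp-list three-pass scheme by one in-place backward two-pointer pass plus a
-- zero prefix fill (alternative algorithm, O(1) instead of O(n) extra space); both Pythons
-- mutate arr identically wherever both return, and the theorems are about the return value.

-- ===== PORT A =====
-- counters count_zero/count_non_zero/j are Python ints that never go negative; ported as Nat
def move_zeros_to_start_1 (arr : List Int) (n : Int) : List Int :=
  if n = 0 ∨ n = 1 then arr
  else
    -- temp = list(); for i in range(n): temp.append(None)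
    let temp : List (Option Int) :=
      (PySem.List.pyRange 0 n 1).foldl (fun t _ => t ++ [none]) []
    -- counting pass: temp[count_non_zero] = arr[i] / count_zero += 1
    let s :=
      (PySem.List.pyRange 0 n 1).foldl
        (fun (st : List (Option Int) × Nat × Nat) i =>
          if PySem.List.pyGetD arr i 0 ≠ 0 then
            (st.1.set st.2.2 (some (PySem.List.pyGetD arr i 0)), st.2.1, st.2.2 + 1)
          else
            (st.1, st.2.1 + 1, st.2.2))
        (temp, 0, 0)
    -- for i in range(count_zero): arr[i] = 0
    let arr1 :=
      (PySem.List.pyRange 0 (s.2.1 : Int) 1).foldl (fun a i => a.set i.toNat 0) arr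
    -- j = 0; for i in range(count_zero, n): arr[i] = temp[j]; j = j+1
    ((PySem.List.pyRange (s.2.1 : Int) n 1).foldl
        (fun (st : List Int × Nat) i =>
          (st.1.set i.toNat ((s.1.getD st.2 none).getD 0), st.2 + 1))
        (arr1, 0)).1

-- ===== PORT B =====
def move_zeros_to_start_1_alt (arr : List Int) (n : Int) : List Int :=
  if n = 0 ∨ n = 1 then arr
  else
    -- write = n-1; for i in range(n-1, -1, -1): if arr[i] != 0: arr[write] = arr[i]; write -= 1
    let s :=
      (PySem.List.pyRange (n - 1) (-1) (-1)).foldl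
        (fun (st : List Int × Int) i =>
          if PySem.List.pyGetD st.1 i 0 ≠ 0 then
            (st.1.set st.2.toNat (PySem.List.pyGetD st.1 i 0), st.2 - 1)
          else st)
        (arr, n - 1)
    -- for i in range(write + 1): arr[i] = 0
    (PySem.List.pyRange 0 (s.2 + 1) 1).foldl (fun a i => a.set i.toNat 0) s.1

-- ===== PRECONDITION & SPEC =====
-- Pre_ excludes exactly the inputs where A raises IndexError: n ≥ 2 together with n > len(arr).
def Pre_move_zeros_to_start_1 (arr : List Int) (n : Int) : Prop :=
  n ≤ (arr.length : Int) ∨ n < 2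
instance (arr : List Int) (n : Int) : Decidable (Pre_move_zeros_to_start_1 arr n) := by
  unfold Pre_move_zeros_to_start_1; infer_instance

def pvWitness_move_zeros_to_start_1 : List Int × Int := ([0, 3, 0, 5, 0], 5)

def Spec_move_zeros_to_start_1 (arr : List Int) (n : Int) (out : List Int) : Prop :=
  out = move_zeros_to_start_1_alt arr n
instance (arr : List Int) (n : Int) (out : List Int) : Decidable (Spec_move_zeros_to_start_1 arr n out) := by
  unfold Spec_move_zeros_to_start_1; infer_instance

-- ===== CLAIM (what is proved, stated in full; the proofs are below) =====
def Claim_equal_move_zeros_to_start_1 : Prop :=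
  ∀ (arr : List Int) (n : Int), Dom_move_zeros_to_start_1 arr n →
    Pre_move_zeros_to_start_1 arr n →
    Spec_move_zeros_to_start_1 arr n (move_zeros_to_start_1 arr n)

-- ===== LEMMAS AND PROOFS =====

-- zero-fill loop: for i in range(z): l[i] = 0
theorem pv_fill_zeros (z : Nat) : ∀ (l : List Int), z ≤ l.length →
    (PySem.List.pyRange 0 (z : Int) 1).foldl (fun a i => a.set i.toNat 0) l
      = List.replicate z 0 ++ l.drop z := by
  induction z with
  | zero => intro l _; simp [PySem.List.pyRange_one_eq_nil]
  | succ z ih =>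
    intro l hl
    have hsplit : PySem.List.pyRange 0 ((z : Int) + 1) 1
        = PySem.List.pyRange 0 (z : Int) 1 ++ [(z : Int)] :=
      PySem.List.pyRange_one_succ_right (by exact_mod_cast Nat.zero_le z)
    have hz : z < l.length := hl
    have hdrop : l.drop z = l[z] :: l.drop (z + 1) := List.drop_eq_getElem_cons hz
    have hc : ((z : Nat) : Int) + 1 = ((z + 1 : Nat) : Int) := by push_cast; ring
    rw [← hc, hsplit, List.foldl_append, ih l (Nat.le_of_lt hz)]
    simp only [List.foldl_cons, List.foldl_nil, Int.toNat_natCast]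
    rw [List.set_append_right _ _ (by simp), hdrop]
    simp only [List.length_replicate, Nat.sub_self, List.set_cons_zero]
    rw [List.replicate_succ']
    simp

-- copy loop: j = j0; for i in range(a, a+k): l[i] = temp[j]; j = j+1
theorem pv_copy_seg (vs : List (Option Int)) :
    ∀ (k a j0 : Nat) (l : List Int), a + k ≤ l.length →
    ((PySem.List.pyRange (a : Int) ((a : Int) + (k : Int)) 1).foldl
        (fun (st : List Int × Nat) i => (st.1.set i.toNat ((vs.getD st.2 none).getD 0), st.2 + 1)) (l, j0))
      = (l.take a ++ (List.range k).map (fun t => ((vs.getD (j0 + t) none).getD 0)) ++ l.drop (a + k), j0 + k) := by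
  intro k
  induction k with
  | zero =>
    intro a j0 l _
    simp [PySem.List.pyRange_one_eq_nil]
  | succ k ih =>
    intro a j0 l hl
    have hsplit : PySem.List.pyRange (a : Int) ((a : Int) + ((k : Int) + 1)) 1
        = PySem.List.pyRange (a : Int) ((a : Int) + (k : Int)) 1 ++ [(a : Int) + (k : Int)] := by
      have h := PySem.List.pyRange_one_succ_right
        (a := (a : Int)) (b := (a : Int) + (k : Int)) (by omega)
      rw [add_assoc] at h; exact h
    have hcast : ((k + 1 : Nat) : Int) = (k : Int) + 1 := by push_cast; ring
    rw [hcast, hsplit, List.foldl_append, ih a j0 l (by omega)]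
    simp only [List.foldl_cons, List.foldl_nil]
    have htn : ((a : Int) + (k : Int)).toNat = a + k := by omega
    have hak : a + k < l.length := by omega
    have hlen1 : (l.take a ++ (List.range k).map (fun t => ((vs.getD (j0 + t) none).getD 0))).length = a + k := by
      simp [Nat.min_eq_left (by omega : a ≤ l.length)]
    have hdrop : l.drop (a + k) = l[a + k] :: l.drop (a + k + 1) :=
      List.drop_eq_getElem_cons hak
    rw [htn, List.append_assoc, ← List.append_assoc (l.take a),
        List.set_append_right _ _ hlen1.le, hlen1, Nat.sub_self]
    simp only [List.range_succ, List.map_append, List.map_cons, List.map_nil, List.append_assoc]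
    rw [hdrop]
    rfl

-- A's counting pass: characterisation of (temp, count_zero, count_non_zero)
theorem pv_countA (arr : List Int) (N : Nat) :
    ∀ (m : Nat), m ≤ N → N ≤ arr.length →
    (PySem.List.pyRange 0 (m : Int) 1).foldl
        (fun (st : List (Option Int) × Nat × Nat) i =>
          if PySem.List.pyGetD arr i 0 ≠ 0 then
            (st.1.set st.2.2 (some (PySem.List.pyGetD arr i 0)), st.2.1, st.2.2 + 1)
          else
            (st.1, st.2.1 + 1, st.2.2))
        (List.replicate N none, 0, 0)
      = (((arr.take m).filter (fun x => !decide (x = 0))).map some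
            ++ List.replicate (N - ((arr.take m).filter (fun x => !decide (x = 0))).length) none,
          m - ((arr.take m).filter (fun x => !decide (x = 0))).length,
          ((arr.take m).filter (fun x => !decide (x = 0))).length) := by
  intro m
  induction m with
  | zero => intro _ _; simp [PySem.List.pyRange_one_eq_nil]
  | succ m ih =>
    intro hm hN
    have hm' : m < arr.length := by omega
    have hsplit : PySem.List.pyRange 0 ((m : Int) + 1) 1
        = PySem.List.pyRange 0 (m : Int) 1 ++ [(m : Int)] :=
      PySem.List.pyRange_one_succ_right (by exact_mod_cast Nat.zero_le m)
    have hcast : ((m + 1 : Nat) : Int) = (m : Int) + 1 := by push_cast; ring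
    have hget : PySem.List.pyGetD arr (m : Int) 0 = arr[m] := by
      rw [PySem.List.pyGetD_natCast, List.getD_eq_getElem _ _ hm']
    have htake : (arr.take (m + 1)).filter (fun x => !decide (x = 0))
        = (arr.take m).filter (fun x => !decide (x = 0))
            ++ (if arr[m] = 0 then [] else [arr[m]]) := by
      rw [List.take_succ_eq_append_getElem hm', List.filter_append]
      by_cases h0 : arr[m] = 0 <;> simp [h0]
    set F := (arr.take m).filter (fun x => !decide (x = 0)) with hF
    have hflen : F.length ≤ m := by
      calc F.length ≤ (arr.take m).length := List.length_filter_le _ _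
        _ ≤ m := by simp
    rw [hcast, hsplit, List.foldl_append, ih (by omega) hN]
    simp only [List.foldl_cons, List.foldl_nil, hget, htake]
    by_cases h0 : arr[m] = 0
    · simp only [h0, ne_eq, not_true_eq_false, if_false, if_true, List.append_nil]
      simp only [Prod.mk.injEq]
      exact ⟨trivial, by omega, trivial⟩
    · have hFm : F.length < N := by omega
      simp only [h0, ne_eq, not_false_eq_true, if_true, if_false]
      rw [List.set_append_right _ _ (by simp), List.length_map, Nat.sub_self]
      have hrepl : List.replicate (N - F.length) (none : Option Int)
          = none :: List.replicate (N - (F.length + 1)) none := by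
        have he : N - F.length = (N - (F.length + 1)) + 1 := by omega
        rw [he, List.replicate_succ]
      rw [hrepl, List.set_cons_zero]
      simp only [Prod.mk.injEq]
      refine ⟨by simp, by simp, by simp⟩

-- B's backward compaction pass
theorem pv_compactB (orig : List Int) (m : Nat) (hm : m ≤ orig.length) :
    ∀ (i : Nat), i ≤ m →
    (PySem.List.pyRange ((i : Int) - 1) (-1) (-1)).foldl
        (fun (st : List Int × Int) j =>
          if PySem.List.pyGetD st.1 j 0 ≠ 0 then
            (st.1.set st.2.toNat (PySem.List.pyGetD st.1 j 0), st.2 - 1)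
          else st)
        (orig.take (m - (((orig.take m).drop i).filter (fun x => !decide (x = 0))).length)
            ++ ((orig.take m).drop i).filter (fun x => !decide (x = 0)) ++ orig.drop m,
          (m : Int) - 1 - ((((orig.take m).drop i).filter (fun x => !decide (x = 0))).length : Int))
      = (orig.take (m - ((orig.take m).filter (fun x => !decide (x = 0))).length)
            ++ (orig.take m).filter (fun x => !decide (x = 0)) ++ orig.drop m,
          (m : Int) - 1 - (((orig.take m).filter (fun x => !decide (x = 0))).length : Int)) := by
  intro i
  induction i with
  | zero =>
    intro _
    simp only [Nat.cast_zero, List.drop_zero]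
    rw [PySem.List.pyRange_neg_one_eq_nil (by omega : (0:Int) - 1 ≤ -1)]
    simp
  | succ i ih =>
    intro hi
    set C := ((orig.take m).drop (i + 1)).filter (fun x => !decide (x = 0)) with hC
    have hClen : C.length ≤ m - (i + 1) := by
      calc C.length ≤ ((orig.take m).drop (i + 1)).length := List.length_filter_le _ _
        _ = m - (i + 1) := by simp; omega
    have hi' : i < orig.length := by omega
    have hiT : i < (orig.take m).length := by simp; omega
    have hdropT : (orig.take m).drop i = (orig.take m)[i] :: (orig.take m).drop (i + 1) :=
      List.drop_eq_getElem_cons hiT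
    have hgetT : (orig.take m)[i] = orig[i] := List.getElem_take
    have hcons : PySem.List.pyRange ((i : Int) + 1 - 1) (-1) (-1)
        = (i : Int) :: PySem.List.pyRange ((i : Int) - 1) (-1) (-1) := by
      have he : ((i : Int) + 1 - 1) = (i : Int) := by ring
      rw [he]
      exact PySem.List.pyRange_neg_one_cons (by omega)
    have hcast : ((i + 1 : Nat) : Int) - 1 = (i : Int) + 1 - 1 := by push_cast; ring
    have hlenTake : (orig.take (m - C.length)).length = m - C.length := by simp; omega
    have hread : PySem.List.pyGetD
        (orig.take (m - C.length) ++ C ++ orig.drop m) (i : Int) 0 = orig[i] := by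
      rw [List.append_assoc, PySem.List.pyGetD_natCast,
          List.getD_eq_getElem _ _ (by simp; omega)]
      rw [List.getElem_append_left (by omega)]
      exact List.getElem_take
    have hCeq0 : ((orig.take m).drop i).filter (fun x => !decide (x = 0))
        = (if orig[i] = 0 then C else orig[i] :: C) := by
      rw [hdropT, hgetT, List.filter_cons, ← hC]
      by_cases h0 : orig[i] = 0 <;> simp [h0]
    rw [hcast, hcons]
    simp only [List.foldl_cons]
    by_cases h0 : orig[i] = 0
    · rw [if_neg (by rw [hread]; simp [h0])]
      have hI := ih (by omega)
      rw [hCeq0, if_pos h0] at hI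
      exact hI
    · rw [if_pos (by rw [hread]; simp [h0])]
      have hw : ((m : Int) - 1 - (C.length : Int)).toNat = m - 1 - C.length := by omega
      have hCm : C.length < m := by omega
      have htk : orig.take (m - C.length)
          = orig.take (m - 1 - C.length) ++ [orig[m - 1 - C.length]] := by
        have he : m - C.length = (m - 1 - C.length) + 1 := by omega
        rw [he]
        exact List.take_succ_eq_append_getElem (by omega)
      have hset : (orig.take (m - C.length) ++ C ++ orig.drop m).set
            (m - 1 - C.length) orig[i]
          = orig.take (m - 1 - C.length) ++ (orig[i] :: C) ++ orig.drop m := by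
        rw [htk, List.append_assoc, List.append_assoc,
            List.set_append_right _ _ (by rw [List.length_take]; omega)]
        rw [List.length_take]
        have hz : m - 1 - C.length - min (m - 1 - C.length) orig.length = 0 := by omega
        rw [hz]
        simp only [List.singleton_append, List.set_cons_zero]
        simp [List.append_assoc]
      rw [hread, hw, hset]
      have harith : ((m : Int) - 1 - (C.length : Int)) - 1
          = (m : Int) - 1 - (((orig[i] :: C).length : Int)) := by simp; ring
      rw [harith]
      have hI := ih (by omega)
      rw [hCeq0, if_neg h0] at hI
      have hnat : m - (orig[i] :: C).length = m - 1 - C.length := by simp; omega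
      rw [hnat] at hI
      exact hI

-- the temp initialisation loop builds replicate n.toNat none
theorem pv_temp_init (n : Int) :
    (PySem.List.pyRange 0 n 1).foldl
        (fun (t : List (Option Int)) _ => t ++ [none]) []
      = List.replicate n.toNat none := by
  rw [PySem.List.foldl_append_singleton_eq_map]
  simp [List.map_const', PySem.List.length_pyRange_one]

-- A's value on the main region, in canonical form
theorem pv_A_char (arr : List Int) (n : Int) (hn2 : ¬ (n = 0 ∨ n = 1)) (hpos : 0 < n)
    (hlen : n ≤ (arr.length : Int)) :
    move_zeros_to_start_1 arr n
      = List.replicate (n.toNat - ((arr.take n.toNat).filter (fun x => !decide (x = 0))).length) 0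
          ++ (arr.take n.toNat).filter (fun x => !decide (x = 0)) ++ arr.drop n.toNat := by
  have hmn : ((n.toNat : Nat) : Int) = n := by omega
  set m := n.toNat with hm
  have hml : m ≤ arr.length := by omega
  set nz := (arr.take m).filter (fun x => !decide (x = 0)) with hnz
  have hnzlen : nz.length ≤ m := by
    calc nz.length ≤ (arr.take m).length := List.length_filter_le _ _
      _ ≤ m := by simp
  unfold move_zeros_to_start_1
  rw [if_neg hn2]
  simp only [pv_temp_init, ← hmn, Int.toNat_natCast]
  rw [pv_countA arr m m (le_refl m) hml]
  simp only [← hnz]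
  rw [pv_fill_zeros (m - nz.length) arr (by omega)]
  have hcopyrange : (m : Int) = ((m - nz.length : Nat) : Int) + ((nz.length : Nat) : Int) := by
    omega
  rw [hcopyrange,
      pv_copy_seg (nz.map some ++ List.replicate (m - nz.length) none)
        nz.length (m - nz.length) 0
        (List.replicate (m - nz.length) 0 ++ arr.drop (m - nz.length))
        (by simp; omega)]
  have h1 : (List.replicate (m - nz.length) 0 ++ arr.drop (m - nz.length)).take (m - nz.length)
      = List.replicate (m - nz.length) (0 : Int) := by
    rw [List.take_append_of_le_length (by simp)]
    simp
  have h2 : (List.replicate (m - nz.length) 0 ++ arr.drop (m - nz.length)).drop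
        (m - nz.length + nz.length)
      = arr.drop m := by
    rw [List.drop_append]
    simp
    omega
  have h3 : (List.range nz.length).map
        (fun t => ((nz.map some ++ List.replicate (m - nz.length) none).getD (0 + t) none).getD 0)
      = nz := by
    apply List.ext_getElem (by simp)
    intro k hk1 hk2
    simp only [List.getElem_map, List.getElem_range, Nat.zero_add]
    have hk : k < nz.length := by simpa using hk2
    rw [List.getD_eq_getElem _ _ (by simp; omega),
        List.getElem_append_left (by simpa using hk)]
    simp
  simp only [h1, h2, h3]

-- B's value on the main region: the same canonical form
theorem pv_B_char (arr : List Int) (n : Int) (hn2 : ¬ (n = 0 ∨ n = 1)) (hpos : 0 < n)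
    (hlen : n ≤ (arr.length : Int)) :
    move_zeros_to_start_1_alt arr n
      = List.replicate (n.toNat - ((arr.take n.toNat).filter (fun x => !decide (x = 0))).length) 0
          ++ (arr.take n.toNat).filter (fun x => !decide (x = 0)) ++ arr.drop n.toNat := by
  have hmn : ((n.toNat : Nat) : Int) = n := by omega
  set m := n.toNat with hm
  have hml : m ≤ arr.length := by omega
  set nz := (arr.take m).filter (fun x => !decide (x = 0)) with hnz
  have hnzlen : nz.length ≤ m := by
    calc nz.length ≤ (arr.take m).length := List.length_filter_le _ _
      _ ≤ m := by simp
  unfold move_zeros_to_start_1_alt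
  rw [if_neg hn2]
  -- the initial state is the i = m instance of the compaction invariant
  have hfull : ((arr.take m).drop m).filter (fun x => !decide (x = 0)) = [] := by simp
  have hstate : (arr, (m : Int) - 1)
      = (arr.take (m - (((arr.take m).drop m).filter (fun x => !decide (x = 0))).length)
            ++ ((arr.take m).drop m).filter (fun x => !decide (x = 0)) ++ arr.drop m,
          (m : Int) - 1 - ((((arr.take m).drop m).filter (fun x => !decide (x = 0))).length : Int)) := by
    rw [hfull]
    simp only [List.length_nil, Nat.sub_zero, List.append_nil, Nat.cast_zero]
    rw [List.take_append_drop]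
    simp [hmn]
  have hrange : n - 1 = ((m : Int)) - 1 := by omega
  rw [hrange, hstate]
  rw [pv_compactB arr m hml m (le_refl m)]
  simp only [← hnz]
  have hw1 : (m : Int) - 1 - (nz.length : Int) + 1 = ((m - nz.length : Nat) : Int) := by
    omega
  rw [hw1, pv_fill_zeros (m - nz.length) _ (by simp; omega)]
  have hdrop : (arr.take (m - nz.length) ++ nz ++ arr.drop m).drop (m - nz.length)
      = nz ++ arr.drop m := by
    rw [List.append_assoc, List.drop_append_of_le_length (by simp; omega)]
    have hd : (arr.take (m - nz.length)).drop (m - nz.length) = [] := by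
      simp
    rw [hd]
    simp
  rw [hdrop]
  simp [List.append_assoc]

-- n < 0: every loop is empty in both ports
theorem pv_neg (arr : List Int) (n : Int) (hn : n < 0) :
    move_zeros_to_start_1 arr n = arr ∧ move_zeros_to_start_1_alt arr n = arr := by
  constructor
  · unfold move_zeros_to_start_1
    rw [if_neg (by omega)]
    simp only [pv_temp_init]
    rw [PySem.List.pyRange_one_eq_nil (by omega : n ≤ (0 : Int))]
    simp only [List.foldl_nil, Nat.cast_zero]
    rw [PySem.List.pyRange_one_eq_nil (le_refl (0 : Int)), PySem.List.pyRange_one_eq_nil (by omega : n ≤ (0 : Int))]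
    rfl
  · unfold move_zeros_to_start_1_alt
    rw [if_neg (by omega)]
    rw [PySem.List.pyRange_neg_one_eq_nil (by omega : n - 1 ≤ -1)]
    simp only [List.foldl_nil]
    rw [PySem.List.pyRange_one_eq_nil (by omega : n - 1 + 1 ≤ 0)]
    rfl

-- ===== VERDICT (by name: the statement is the Claim_ definition above) =====
theorem move_zeros_to_start_1_spec : Claim_equal_move_zeros_to_start_1 := by
  intro arr n _ hpre
  unfold Spec_move_zeros_to_start_1
  by_cases h01 : n = 0 ∨ n = 1
  · unfold move_zeros_to_start_1 move_zeros_to_start_1_alt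
    rw [if_pos h01, if_pos h01]
  · by_cases hneg : n < 0
    · rw [(pv_neg arr n hneg).1, (pv_neg arr n hneg).2]
    · have hpos : 0 < n := by omega
      have hlen : n ≤ (arr.length : Int) := by
        rcases hpre with h | h
        · exact h
        · omega
      rw [pv_A_char arr n h01 hpos hlen, pv_B_char arr n h01 hpos hlen]
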